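-- pv_equiv track=rewrite | github.com/redkyo017/pdf_borehole_report_analyze | find_chemical_tables.py | combine_operators
-- ===== SOURCE A (Python) =====
-- from typing import Dict, List, Optional
--
-- def combine_operators(tokens: List[str]) -> List[str]:
--     combined = []
--     i = 0
--     while i < len(tokens):
--         token = tokens[i]
--         if token in {"<", ">", "<=", ">="} and i + 1 < len(tokens):
--             combined.append(f"{token} {tokens[i + 1]}")
--             i += 2
--         else:
--             combined.append(token)
--             i += 1
--     return combined
-- ===== SOURCE B (Python) =====
-- from typing import List
--
-- def combine_operators(tokens: List[str]) -> List[str]: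
--     result = []
--     pending = None
--     for token in tokens:
--         if pending is not None:
--             result.append(f"{pending} {token}")
--             pending = None
--         elif token in {"<", ">", "<=", ">="}:
--             pending = token
--         else:
--             result.append(token)
--     if pending is not None:
--         result.append(pending)
--     return result
-- ===== Notes on version B (the rewrite author's own statement) =====
-- stated objective: simpler
-- what changed: Replaced the while-loop with manual index arithmetic and look-ahead tokens[i+1] by a single for-loop over the tokens carrying a 'pending' operator variable; the trailing lone operator falls out of the final pending flush instead of the i+1<len guard.
import Mathlib
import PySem

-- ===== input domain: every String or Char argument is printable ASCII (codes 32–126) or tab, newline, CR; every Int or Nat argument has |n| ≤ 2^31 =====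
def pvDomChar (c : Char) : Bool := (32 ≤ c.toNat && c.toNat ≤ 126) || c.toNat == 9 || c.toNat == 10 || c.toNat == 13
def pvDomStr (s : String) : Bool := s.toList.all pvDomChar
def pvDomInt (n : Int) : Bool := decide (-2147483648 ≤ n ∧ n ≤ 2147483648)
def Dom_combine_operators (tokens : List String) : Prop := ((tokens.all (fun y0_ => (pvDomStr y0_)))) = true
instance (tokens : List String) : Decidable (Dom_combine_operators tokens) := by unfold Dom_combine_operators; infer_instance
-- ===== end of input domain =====

-- B replaces A's index look-ahead while-loop by a single for-loop carrying a pending operator (simpler decomposition; same O(n) cost).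


-- ===== PORT A =====
-- the operator set {"<", ">", "<=", ">="}
def caIsOp (t : String) : Bool := t == "<" || t == ">" || t == "<=" || t == ">="

-- the while loop of A: index i, accumulator `combined`
def caGo (tokens : List String) (i : Nat) (combined : List String) : List String :=
  if h : i < tokens.length then
    let token := tokens[i]
    if h2 : caIsOp token ∧ i + 1 < tokens.length then
      caGo tokens (i + 2) (combined ++ [token ++ " " ++ tokens[i + 1]])
    else
      caGo tokens (i + 1) (combined ++ [token])
  else combined
termination_by tokens.length - i

def combine_operators (tokens : List String) : List String := caGo tokens 0 []

-- ===== PORT B =====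
-- the for-loop of B: state = (result, pending)
def cbFold : List String → List String × Option String → List String × Option String
  | [], st => st
  | t :: ts, (res, pending) =>
    cbFold ts
      (match pending with
       | some p => (res ++ [p ++ " " ++ t], none)
       | none => if t == "<" || t == ">" || t == "<=" || t == ">=" then (res, some t) else (res ++ [t], none))

-- the final `if pending is not None: result.append(pending)`
def cbFinish : List String × Option String → List String
  | (res, some p) => res ++ [p]
  | (res, none) => res

def combine_operators_alt (tokens : List String) : List String := cbFinish (cbFold tokens ([], none))

-- ===== PRECONDITION & SPEC =====
def Spec_combine_operators (tokens : List String) (out : List String) : Prop := out = combine_operators_alt tokens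
instance (tokens : List String) (out : List String) : Decidable (Spec_combine_operators tokens out) := by unfold Spec_combine_operators; infer_instance

-- ===== CLAIM (what is proved, stated in full; the proofs are below) =====
def Claim_equal_combine_operators : Prop := ∀ (tokens : List String), Dom_combine_operators tokens → Spec_combine_operators tokens (combine_operators tokens)

-- ===== LEMMAS AND PROOFS =====
theorem caGo_eq (n : Nat) : ∀ (tokens : List String) (i : Nat) (combined : List String),
    tokens.length - i ≤ n →
    caGo tokens i combined = cbFinish (cbFold (tokens.drop i) (combined, none)) := by
  induction n with
  | zero =>
    intro tokens i combined hle
    have hge : tokens.length ≤ i := by omega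
    rw [caGo]
    simp [List.drop_eq_nil_of_le hge, Nat.not_lt.mpr hge, cbFold, cbFinish]
  | succ n ih =>
    intro tokens i combined hle
    rw [caGo]
    by_cases h : i < tokens.length
    · simp only [h, dif_pos]
      have hdrop : tokens.drop i = tokens[i] :: tokens.drop (i + 1) :=
        List.drop_eq_getElem_cons h
      by_cases hop : caIsOp tokens[i]
      · by_cases h2 : i + 1 < tokens.length
        · simp only [hop, h2, and_self, dif_pos]
          have hdrop2 : tokens.drop (i + 1) = tokens[i + 1] :: tokens.drop (i + 2) :=
            List.drop_eq_getElem_cons h2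
          rw [ih tokens (i + 2) _ (by omega), hdrop, hdrop2]
          simp only [cbFold]
          have : (tokens[i] == "<" || tokens[i] == ">" || tokens[i] == "<=" || tokens[i] == ">=") = true := by
            simpa [caIsOp] using hop
          rw [this]
          simp
        · have hnil : tokens.drop (i + 1) = [] :=
            List.drop_eq_nil_of_le (by omega)
          have : ¬ (caIsOp tokens[i] ∧ i + 1 < tokens.length) := by
            intro hc; exact h2 hc.2
          simp only [this, dif_neg, not_false_iff]
          rw [ih tokens (i + 1) _ (by omega), hdrop, hnil]
          simp only [cbFold]
          have hb : (tokens[i] == "<" || tokens[i] == ">" || tokens[i] == "<=" || tokens[i] == ">=") = true := by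
            simpa [caIsOp] using hop
          rw [hb]
          simp [cbFinish]
      · have : ¬ (caIsOp tokens[i] ∧ i + 1 < tokens.length) := by
          intro hc; exact hop hc.1
        simp only [this, dif_neg, not_false_iff]
        rw [ih tokens (i + 1) _ (by omega), hdrop]
        simp only [cbFold]
        have hb : (tokens[i] == "<" || tokens[i] == ">" || tokens[i] == "<=" || tokens[i] == ">=") = false := by
          simpa [caIsOp] using hop
        rw [hb]
        simp
    · simp [h]
      have hge : tokens.length ≤ i := by omega
      simp [List.drop_eq_nil_of_le hge, cbFold, cbFinish]

-- ===== VERDICT (by name: the statement is the Claim_ definition above) =====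
theorem combine_operators_spec : Claim_equal_combine_operators := by
  intro tokens _
  unfold Spec_combine_operators combine_operators combine_operators_alt
  simpa using caGo_eq tokens.length tokens 0 [] (by omega)
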